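-- pv_equiv track=rewrite | github.com/CBI-PITT/bil_api | BrAinPI/tiff_loader.py | axes_pos_extract
-- ===== SOURCE A (Python) =====
-- def axes_pos_extract(axes):
--     """
--     Extract the positions of axes from their labels.
--
--     Args:
--         axes (str): String representing axis labels.
--
--     Returns:
--         dict: Mapping of axis labels to their positions.
--     """
--     dic = {
--         "T": None,
--         "C": None,
--         "Z": None,
--         "Q": None,
--         "I": None,
--         "Y": None,
--         "X": None,
--         "S": None,
--     }
--     characters = list(axes)
--     # logger.info("Axis characters:", characters)
--     for index, char in enumerate(characters):
--         if char in dic: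
--             dic[char] = index
--     return dic
-- ===== SOURCE B (Python) =====
-- def axes_pos_extract(axes):
--     """
--     Extract the positions of axes from their labels.
--
--     Args:
--         axes (str): String representing axis labels.
--
--     Returns:
--         dict: Mapping of axis labels to their positions.
--     """
--     return {k: (None if (p := axes.rfind(k)) == -1 else p) for k in "TCZQIYXS"}
-- ===== Notes on version B (the rewrite author's own statement) =====
-- stated objective: simpler
-- what changed: Replaces the forward scan over the input that overwrites a preset dict with a per-key last-occurrence lookup (axes.rfind) over the eight fixed labels, built as a dict comprehension.
import Mathlib
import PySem

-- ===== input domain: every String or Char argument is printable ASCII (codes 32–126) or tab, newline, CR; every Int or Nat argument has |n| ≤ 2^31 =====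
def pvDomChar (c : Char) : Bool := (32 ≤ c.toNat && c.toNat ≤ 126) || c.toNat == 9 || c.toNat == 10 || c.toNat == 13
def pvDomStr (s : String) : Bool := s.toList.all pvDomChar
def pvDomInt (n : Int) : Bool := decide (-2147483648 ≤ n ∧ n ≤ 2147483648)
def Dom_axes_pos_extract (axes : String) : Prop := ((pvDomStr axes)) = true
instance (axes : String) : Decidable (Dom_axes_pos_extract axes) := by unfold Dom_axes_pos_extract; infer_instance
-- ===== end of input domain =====

-- B replaces A's forward scan (dict overwrite keeps the last occurrence) with a per-key
-- last-occurrence lookup (rfind) over the eight fixed labels; objective: simpler.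

-- ===== PORT A =====
def pvInitDic : PySem.Dict String (Option Int) :=
  PySem.Dict.ofList [("T", none), ("C", none), ("Z", none), ("Q", none),
                     ("I", none), ("Y", none), ("X", none), ("S", none)]

def pvStepA (d : PySem.Dict String (Option Int)) (p : Int × Char) :
    PySem.Dict String (Option Int) :=
  if d.contains (String.ofList [p.2]) then d.insert (String.ofList [p.2]) (some p.1) else d

def axes_pos_extract (axes : String) : List (String × Option Int) :=
  ((PySem.List.enumerate axes.toList 0).foldl pvStepA pvInitDic).items

-- ===== PORT B =====
-- hand port of str.rfind for a single-character needle (PySem has no rfind); exact there: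
-- the last index of k in cs, -1 if absent
def pvRfind : List Char → Char → Int
  | [], _ => -1
  | c :: cs, k =>
      let r := pvRfind cs k
      if r = -1 then (if c = k then 0 else -1) else r + 1

def axes_pos_extract_alt (axes : String) : List (String × Option Int) :=
  "TCZQIYXS".toList.map (fun k =>
    let p := pvRfind axes.toList k
    (String.ofList [k], if p = -1 then none else some p))

-- ===== PRECONDITION & SPEC =====
def Spec_axes_pos_extract (axes : String) (out : List (String × Option Int)) : Prop := out = axes_pos_extract_alt axes
instance (axes : String) (out : List (String × Option Int)) : Decidable (Spec_axes_pos_extract axes out) := by unfold Spec_axes_pos_extract; infer_instance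

-- ===== CLAIM (what is proved, stated in full; the proofs are below) =====
def Claim_equal_axes_pos_extract : Prop := ∀ (axes : String), Dom_axes_pos_extract axes → Spec_axes_pos_extract axes (axes_pos_extract axes)

-- ===== LEMMAS AND PROOFS =====

-- value of key k after scanning cs with running index s, starting from v (A's loop, per key)
def pvG (k : String) (v : Option Int) : List Char → Int → Option Int
  | [], _ => v
  | c :: cs, s => pvG k (if String.ofList [c] = k then some s else v) cs (s + 1)

theorem pvStepA_items (d : PySem.Dict String (Option Int)) (s : Int) (c : Char) :
    (pvStepA d (s, c)).items =
      d.items.map (fun p => (p.1, if String.ofList [c] = p.1 then some s else p.2)) := by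
  unfold pvStepA
  by_cases h : d.contains (String.ofList [c])
  · rw [if_pos h, PySem.Dict.items_insert_of_contains (h := h)]
    apply List.map_congr_left
    intro p _
    by_cases hp : String.ofList [c] = p.1
    · simp [hp]
    · have : ¬ (p.1 == String.ofList [c]) = true := by
        simp [beq_iff_eq]; exact fun e => hp e.symm
      simp [this, hp]
  · rw [if_neg h]
    have hk : String.ofList [c] ∉ d.keys := by
      intro hm
      exact h ((PySem.Dict.contains_iff_mem_keys d (String.ofList [c])).mpr hm)
    have : ∀ p ∈ d.items, (p.1, if String.ofList [c] = p.1 then some s else p.2) = p := by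
      intro p hp
      have hne : String.ofList [c] ≠ p.1 := by
        intro e
        exact hk (e ▸ PySem.Dict.mem_keys_of_mem_items (d := d) hp)
      simp [hne]
    exact (List.map_congr_left this).trans (List.map_id _) |>.symm

theorem pvFold_items (cs : List Char) :
    ∀ (s : Int) (d : PySem.Dict String (Option Int)),
      ((PySem.List.enumerate cs s).foldl pvStepA d).items =
        d.items.map (fun p => (p.1, pvG p.1 p.2 cs s)) := by
  induction cs with
  | nil =>
      intro s d
      simp [PySem.List.enumerate_nil, pvG]
  | cons c cs ih =>
      intro s d
      rw [PySem.List.enumerate_cons, List.foldl_cons, ih (s + 1), pvStepA_items, List.map_map]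
      apply List.map_congr_left
      intro p _
      simp [pvG]

theorem pvRfind_ge (cs : List Char) (k : Char) : -1 ≤ pvRfind cs k := by
  induction cs with
  | nil => simp [pvRfind]
  | cons c cs ih =>
      simp only [pvRfind]
      split
      · split <;> omega
      · omega

theorem pvMk_singleton_eq_iff (c k : Char) : String.ofList [c] = String.ofList [k] ↔ c = k := by
  constructor
  · intro h
    have := congrArg String.toList h
    simpa using this
  · intro h; rw [h]

theorem pvG_rfind (cs : List Char) :
    ∀ (v : Option Int) (s : Int) (k : Char),
      pvG (String.ofList [k]) v cs s =
        if pvRfind cs k = -1 then v else some (s + pvRfind cs k) := by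
  induction cs with
  | nil => intro v s k; simp [pvG, pvRfind]
  | cons c cs ih =>
      intro v s k
      have h0 : pvG (String.ofList [k]) v (c :: cs) s =
          pvG (String.ofList [k])
            (if String.ofList [c] = String.ofList [k] then some s else v) cs (s + 1) := rfl
      have h2 : pvRfind (c :: cs) k =
          if pvRfind cs k = -1 then (if c = k then (0 : Int) else -1)
          else pvRfind cs k + 1 := rfl
      rw [h0, ih, h2]
      by_cases hr : pvRfind cs k = -1
      · rw [if_pos hr, if_pos hr]
        by_cases hc : c = k
        · rw [if_pos hc, if_pos ((pvMk_singleton_eq_iff c k).mpr hc),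
              if_neg (by omega : ¬ ((0 : Int) = -1))]
          norm_num
        · rw [if_neg hc,
              if_neg (fun e => hc ((pvMk_singleton_eq_iff c k).mp e)),
              if_pos rfl]
      · have hge := pvRfind_ge cs k
        rw [if_neg hr, if_neg hr, if_neg (by omega : ¬ (pvRfind cs k + 1 = -1))]
        congr 1
        omega

-- ===== VERDICT (by name: the statement is the Claim_ definition above) =====
theorem axes_pos_extract_spec : Claim_equal_axes_pos_extract := by
  intro axes _
  unfold Spec_axes_pos_extract axes_pos_extract axes_pos_extract_alt
  rw [pvFold_items]
  have hitems : pvInitDic.items =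
      [("T", (none : Option Int)), ("C", none), ("Z", none), ("Q", none),
       ("I", none), ("Y", none), ("X", none), ("S", none)] := by rfl
  rw [hitems]
  have hkeys : "TCZQIYXS".toList = ['T', 'C', 'Z', 'Q', 'I', 'Y', 'X', 'S'] := by rfl
  rw [hkeys]
  simp only [List.map]
  have key : ∀ (k : Char), (String.ofList [k], pvG (String.ofList [k]) none axes.toList 0) =
      (String.ofList [k], if pvRfind axes.toList k = -1 then none
                      else some (pvRfind axes.toList k)) := by
    intro k
    rw [pvG_rfind]
    congr 1
    split <;> simp
  have e : ∀ (c : Char) (lit : String), lit = String.ofList [c] →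
      ((lit, pvG lit none axes.toList 0) : String × Option Int) =
        (String.ofList [c], if pvRfind axes.toList c = -1 then none
                        else some (pvRfind axes.toList c)) := by
    intro c lit h; rw [h]; exact key c
  rw [e 'T' "T" rfl, e 'C' "C" rfl, e 'Z' "Z" rfl, e 'Q' "Q" rfl,
      e 'I' "I" rfl, e 'Y' "Y" rfl, e 'X' "X" rfl, e 'S' "S" rfl]
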